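-- pv_equiv track=rewrite | github.com/ViniciusPerillo/Trabalho-1-Compiladores-2025 | T4/VisitorInterp.py | _tipo_dominante
-- ===== SOURCE A (Python) =====
-- def _tipo_dominante(tipos):
--     tipos = [t for t in tipos if t != 'indefinido']
--     if not tipos:
--         return 'indefinido'
--     if 'logico' in tipos:
--         return 'logico'
--     if 'real' in tipos:
--         return 'real'
--     if 'inteiro' in tipos:
--         return 'inteiro'
--     if 'literal' in tipos:
--         return 'literal'
--     return tipos[0]
-- ===== SOURCE B (Python) =====
-- def _tipo_dominante(tipos):
--     rank = {'logico': 0, 'real': 1, 'inteiro': 2, 'literal': 3}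
--     best_rank, best = 5, 'indefinido'
--     for t in tipos:
--         if t == 'indefinido':
--             continue
--         r = rank.get(t, 4)
--         if r < best_rank:
--             best_rank, best = r, t
--     return best
-- ===== Notes on version B (the rewrite author's own statement) =====
-- stated objective: simpler
-- what changed: Replaces the filter pass plus four separate membership scans with a single minimum-priority scan keeping (best_rank, best); strict '<' makes the first equal-rank unknown type win, reproducing the tipos[0] fallback, and the 'indefinido' initial best covers the empty/all-indefinido case.
import Mathlib
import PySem

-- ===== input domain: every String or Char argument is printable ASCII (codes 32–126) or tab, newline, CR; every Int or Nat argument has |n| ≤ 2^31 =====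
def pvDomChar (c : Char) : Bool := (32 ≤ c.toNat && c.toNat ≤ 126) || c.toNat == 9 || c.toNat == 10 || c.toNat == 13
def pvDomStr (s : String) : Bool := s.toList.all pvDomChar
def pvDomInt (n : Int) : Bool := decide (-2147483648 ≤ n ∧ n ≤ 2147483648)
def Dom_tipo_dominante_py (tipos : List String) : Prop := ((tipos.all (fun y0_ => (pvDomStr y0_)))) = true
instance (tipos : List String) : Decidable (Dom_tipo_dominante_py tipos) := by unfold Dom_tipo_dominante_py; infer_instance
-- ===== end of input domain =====

-- B replaces A's filter pass plus four membership scans by a single minimum-priority scan (simpler, one pass).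

-- ===== PORT A =====
-- A: filter out 'indefinido', empty → 'indefinido', then four membership checks, else first filtered element.
def tipo_dominante_py (tipos : List String) : String :=
  match tipos.filter (fun t => t ≠ "indefinido") with
  | [] => "indefinido"
  | h :: rest =>
    if "logico" ∈ (h :: rest) then "logico"
    else if "real" ∈ (h :: rest) then "real"
    else if "inteiro" ∈ (h :: rest) then "inteiro"
    else if "literal" ∈ (h :: rest) then "literal"
    else h   -- tipos[0] of the (nonempty) filtered list

-- ===== PORT B =====
-- rank.get(t, 4) on the literal 4-entry dict
def pvRank (t : String) : Nat :=
  if t = "logico" then 0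
  else if t = "real" then 1
  else if t = "inteiro" then 2
  else if t = "literal" then 3
  else 4

-- one loop iteration of Source B: skip 'indefinido', update (best_rank, best) on strict improvement
def pvStep (st : Nat × String) (t : String) : Nat × String :=
  if t = "indefinido" then st
  else if pvRank t < st.1 then (pvRank t, t) else st

def tipo_dominante_py_alt (tipos : List String) : String :=
  (tipos.foldl pvStep (5, "indefinido")).2

-- ===== PRECONDITION & SPEC =====
def Spec_tipo_dominante_py (tipos : List String) (out : String) : Prop := out = tipo_dominante_py_alt tipos
instance (tipos : List String) (out : String) : Decidable (Spec_tipo_dominante_py tipos out) := by unfold Spec_tipo_dominante_py; infer_instance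

-- ===== CLAIM (what is proved, stated in full; the proofs are below) =====
def Claim_equal_tipo_dominante_py : Prop := ∀ (tipos : List String), Dom_tipo_dominante_py tipos → Spec_tipo_dominante_py tipos (tipo_dominante_py tipos)

-- ===== LEMMAS AND PROOFS =====

theorem pvRank_ge1 (t : String) (h : t ≠ "logico") : 1 ≤ pvRank t := by
  unfold pvRank; split_ifs <;> simp_all

theorem pvRank_ge2 (t : String) (h0 : t ≠ "logico") (h1 : t ≠ "real") : 2 ≤ pvRank t := by
  unfold pvRank; split_ifs <;> simp_all

theorem pvRank_ge3 (t : String) (h0 : t ≠ "logico") (h1 : t ≠ "real") (h2 : t ≠ "inteiro") :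
    3 ≤ pvRank t := by
  unfold pvRank; split_ifs <;> simp_all

theorem pvRank_eq4 (t : String) (h0 : t ≠ "logico") (h1 : t ≠ "real") (h2 : t ≠ "inteiro")
    (h3 : t ≠ "literal") : pvRank t = 4 := by
  unfold pvRank; split_ifs <;> simp_all

-- skipping 'indefinido' inside the loop = folding over the filtered list
theorem foldl_step_filter (l : List String) (st : Nat × String) :
    l.foldl pvStep st = (l.filter (fun t => t ≠ "indefinido")).foldl pvStep st := by
  induction l generalizing st with
  | nil => rfl
  | cons t l ih =>
    by_cases h : t = "indefinido"
    · simp [h, pvStep, List.filter, ih]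
    · simp [List.filter, h, List.foldl, ih]

-- once no element can strictly improve, the state is final
theorem foldl_step_const (l : List String) (st : Nat × String)
    (h : ∀ t ∈ l, st.1 ≤ pvRank t) : l.foldl pvStep st = st := by
  induction l with
  | nil => rfl
  | cons t l ih =>
    have ht := h t (by simp)
    have hst : pvStep st t = st := by
      unfold pvStep; split_ifs with h1 h2 <;> first | rfl | omega
    rw [List.foldl_cons, hst]
    exact ih (fun x hx => h x (by simp [hx]))

theorem find_logico (l : List String) (st : Nat × String)
    (hm : "logico" ∈ l) (hpos : 0 < st.1) : (l.foldl pvStep st).2 = "logico" := by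
  induction l generalizing st with
  | nil => simp at hm
  | cons t l ih =>
    rw [List.foldl_cons]
    by_cases ht : t = "logico"
    · have hstep : pvStep st t = (0, "logico") := by
        subst ht; unfold pvStep pvRank; simp; omega
      rw [hstep, foldl_step_const l (0, "logico") (fun x _ => Nat.zero_le _)]
    · have hm' : "logico" ∈ l := by rcases hm with _ | hm; exact absurd rfl ht; assumption
      refine ih (pvStep st t) hm' ?_
      have := pvRank_ge1 t ht
      unfold pvStep; split_ifs <;> simp <;> omega

theorem find_real (l : List String) (st : Nat × String)
    (hm : "real" ∈ l) (hn0 : "logico" ∉ l) (hpos : 1 < st.1) :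
    (l.foldl pvStep st).2 = "real" := by
  induction l generalizing st with
  | nil => simp at hm
  | cons t l ih =>
    rw [List.foldl_cons]
    have ht0 : t ≠ "logico" := fun h => hn0 (by simp [h])
    by_cases ht : t = "real"
    · have hstep : pvStep st t = (1, "real") := by
        subst ht; unfold pvStep pvRank; simp; omega
      rw [hstep, foldl_step_const l (1, "real")
        (fun x hx => pvRank_ge1 x (fun h => hn0 (by simp [h ▸ hx])))]
    · have hm' : "real" ∈ l := by rcases hm with _ | hm; exact absurd rfl ht; assumption
      refine ih (pvStep st t) hm' (fun h => hn0 (by simp [h])) ?_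
      have := pvRank_ge2 t ht0 ht
      unfold pvStep; split_ifs <;> simp <;> omega

theorem find_inteiro (l : List String) (st : Nat × String)
    (hm : "inteiro" ∈ l) (hn0 : "logico" ∉ l) (hn1 : "real" ∉ l) (hpos : 2 < st.1) :
    (l.foldl pvStep st).2 = "inteiro" := by
  induction l generalizing st with
  | nil => simp at hm
  | cons t l ih =>
    rw [List.foldl_cons]
    have ht0 : t ≠ "logico" := fun h => hn0 (by simp [h])
    have ht1 : t ≠ "real" := fun h => hn1 (by simp [h])
    by_cases ht : t = "inteiro"
    · have hstep : pvStep st t = (2, "inteiro") := by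
        subst ht; unfold pvStep pvRank; simp; omega
      rw [hstep, foldl_step_const l (2, "inteiro")
        (fun x hx => pvRank_ge2 x (fun h => hn0 (by simp [h ▸ hx]))
          (fun h => hn1 (by simp [h ▸ hx])))]
    · have hm' : "inteiro" ∈ l := by rcases hm with _ | hm; exact absurd rfl ht; assumption
      refine ih (pvStep st t) hm' (fun h => hn0 (by simp [h])) (fun h => hn1 (by simp [h])) ?_
      have := pvRank_ge3 t ht0 ht1 ht
      unfold pvStep; split_ifs <;> simp <;> omega

theorem find_literal (l : List String) (st : Nat × String)
    (hm : "literal" ∈ l) (hn0 : "logico" ∉ l) (hn1 : "real" ∉ l) (hn2 : "inteiro" ∉ l)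
    (hpos : 3 < st.1) : (l.foldl pvStep st).2 = "literal" := by
  induction l generalizing st with
  | nil => simp at hm
  | cons t l ih =>
    rw [List.foldl_cons]
    have ht0 : t ≠ "logico" := fun h => hn0 (by simp [h])
    have ht1 : t ≠ "real" := fun h => hn1 (by simp [h])
    have ht2 : t ≠ "inteiro" := fun h => hn2 (by simp [h])
    by_cases ht : t = "literal"
    · have hstep : pvStep st t = (3, "literal") := by
        subst ht; unfold pvStep pvRank; simp; omega
      rw [hstep, foldl_step_const l (3, "literal")
        (fun x hx => pvRank_ge3 x (fun h => hn0 (by simp [h ▸ hx]))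
          (fun h => hn1 (by simp [h ▸ hx])) (fun h => hn2 (by simp [h ▸ hx])))]
    · have hm' : "literal" ∈ l := by rcases hm with _ | hm; exact absurd rfl ht; assumption
      refine ih (pvStep st t) hm' (fun h => hn0 (by simp [h])) (fun h => hn1 (by simp [h]))
        (fun h => hn2 (by simp [h])) ?_
      have : pvRank t = 4 := pvRank_eq4 t ht0 ht1 ht2 ht
      unfold pvStep; split_ifs <;> simp <;> omega

-- ===== VERDICT (by name: the statement is the Claim_ definition above) =====
theorem tipo_dominante_py_spec : Claim_equal_tipo_dominante_py := by
  intro tipos _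
  unfold Spec_tipo_dominante_py tipo_dominante_py tipo_dominante_py_alt
  rw [foldl_step_filter]
  cases hF : tipos.filter (fun t => t ≠ "indefinido") with
  | nil => rfl
  | cons h rest =>
    have hmemF : ∀ t ∈ h :: rest, t ≠ "indefinido" := by
      intro t ht
      have := List.of_mem_filter (hF ▸ ht)
      simpa using this
    by_cases h0 : "logico" ∈ h :: rest
    · simp only [h0, if_pos]
      exact (find_logico _ _ h0 (by norm_num)).symm
    · by_cases h1 : "real" ∈ h :: rest
      · simp only [h0, h1, if_pos]
        exact (find_real _ _ h1 h0 (by norm_num)).symm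
      · by_cases h2 : "inteiro" ∈ h :: rest
        · simp only [h0, h1, h2, if_pos]
          exact (find_inteiro _ _ h2 h0 h1 (by norm_num)).symm
        · by_cases h3 : "literal" ∈ h :: rest
          · simp only [h0, h1, h2, h3, if_pos]
            exact (find_literal _ _ h3 h0 h1 h2 (by norm_num)).symm
          · simp only [h0, h1, h2, h3]
            have hh0 : h ≠ "logico" := fun he => h0 (by simp [he])
            have hh1 : h ≠ "real" := fun he => h1 (by simp [he])
            have hh2 : h ≠ "inteiro" := fun he => h2 (by simp [he])
            have hh3 : h ≠ "literal" := fun he => h3 (by simp [he])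
            have hstep : pvStep (5, "indefinido") h = (4, h) := by
              unfold pvStep
              rw [if_neg (hmemF h (by simp)), pvRank_eq4 h hh0 hh1 hh2 hh3]
              simp
            rw [List.foldl_cons, hstep, foldl_step_const rest (4, h) ?_]
            · simp
            intro x hx
            have hx0 : x ≠ "logico" := fun he => h0 (by simp [he ▸ hx])
            have hx1 : x ≠ "real" := fun he => h1 (by simp [he ▸ hx])
            have hx2 : x ≠ "inteiro" := fun he => h2 (by simp [he ▸ hx])
            have hx3 : x ≠ "literal" := fun he => h3 (by simp [he ▸ hx])
            rw [pvRank_eq4 x hx0 hx1 hx2 hx3]
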